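-- pv_equiv track=rewrite | github.com/jackedney/choresir | src/agents/tools/verification_tools.py | _fuzzy_match_all_chores
-- ===== SOURCE A (Python) =====
-- def _fuzzy_match_all_chores(chores: list[dict], title_query: str) -> list[dict]:
--     """
--     Fuzzy match all chores matching a title query.
--
--     Args:
--         chores: List of chore records
--         title_query: User's search query
--
--     Returns:
--         List of all matching chores (may be empty)
--     """
--     title_lower = title_query.lower().strip()
--     matches: list[dict] = []
--
--     # Exact match (highest priority)
--     for chore in chores:
--         if chore["title"].lower() == title_lower:
--             matches.append(chore)
--
--     if matches:
--         return matches
--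
--     # Contains match
--     for chore in chores:
--         if title_lower in chore["title"].lower():
--             matches.append(chore)
--
--     if matches:
--         return matches
--
--     # Partial word match
--     query_words = set(title_lower.split())
--     for chore in chores:
--         chore_words = set(chore["title"].lower().split())
--         if query_words & chore_words:  # Intersection
--             matches.append(chore)
--
--     return matches
-- ===== SOURCE B (Python) =====
-- def _fuzzy_match_all_chores(chores: list[dict], title_query: str) -> list[dict]:
--     """Single-pass bucketing: classify each chore once (exact / contains / word),
--     computing the lowered title once per chore, then return the best non-empty tier."""
--     query = title_query.lower().strip()
--     query_words = set(query.split())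
--     exact: list[dict] = []
--     contains: list[dict] = []
--     word: list[dict] = []
--     for chore in chores:
--         title = chore["title"].lower()
--         if title == query:
--             exact.append(chore)
--         elif query in title:
--             contains.append(chore)
--         elif query_words & set(title.split()):
--             word.append(chore)
--     return exact or contains or word
-- ===== Notes on version B (the rewrite author's own statement) =====
-- stated objective: alternative
-- what changed: Replaced A's three sequential short-circuiting scans over chores by a single bucketing pass that lowers each title once and appends each chore to one of three priority tiers (exact/contains/word), returning the best non-empty tier.
import Mathlib
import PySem

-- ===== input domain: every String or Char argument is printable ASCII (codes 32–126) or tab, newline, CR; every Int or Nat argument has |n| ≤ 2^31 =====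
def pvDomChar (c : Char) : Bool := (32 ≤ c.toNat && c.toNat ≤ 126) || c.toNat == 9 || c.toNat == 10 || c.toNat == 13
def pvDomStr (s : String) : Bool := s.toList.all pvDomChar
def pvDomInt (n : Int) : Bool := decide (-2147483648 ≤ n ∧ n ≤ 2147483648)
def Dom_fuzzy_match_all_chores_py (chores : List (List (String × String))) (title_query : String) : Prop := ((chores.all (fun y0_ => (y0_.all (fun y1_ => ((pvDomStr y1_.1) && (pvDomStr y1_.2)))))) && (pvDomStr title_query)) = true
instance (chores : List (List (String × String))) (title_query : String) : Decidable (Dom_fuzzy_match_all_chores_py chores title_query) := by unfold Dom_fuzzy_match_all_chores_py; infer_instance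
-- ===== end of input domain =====

-- B replaces A's three sequential scans by one bucketing pass (alternative decomposition, same cost);
-- equality is about return values (neither mutates its arguments).

-- ===== PORT A =====
-- chore["title"]: first-match dict lookup; Pre_ guarantees the key is present, `getD ""` only totalises.
def pvTitle (chore : List (String × String)) : String :=
  ((PySem.Dict.mk chore).get? "title").getD ""

def fuzzy_match_all_chores_py (chores : List (List (String × String))) (title_query : String) : List (List (String × String)) :=
  let title_lower := PySem.Str.strip (PySem.Str.lower title_query)
  let matches1 := chores.foldl (fun acc chore =>
      if PySem.Str.lower (pvTitle chore) = title_lower then acc ++ [chore] else acc) []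
  if matches1 ≠ [] then matches1 else
  let matches2 := chores.foldl (fun acc chore =>
      if PySem.Str.isIn title_lower (PySem.Str.lower (pvTitle chore)) then acc ++ [chore] else acc) []
  if matches2 ≠ [] then matches2 else
  let query_words := PySem.Set.ofList (PySem.Str.split₀ title_lower)
  chores.foldl (fun acc chore =>
      if PySem.Set.inter query_words (PySem.Set.ofList (PySem.Str.split₀ (PySem.Str.lower (pvTitle chore)))) ≠ [] then acc ++ [chore] else acc) []

-- ===== PORT B =====
def fuzzy_match_all_chores_py_alt (chores : List (List (String × String))) (title_query : String) : List (List (String × String)) :=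
  let query := PySem.Str.strip (PySem.Str.lower title_query)
  let query_words := PySem.Set.ofList (PySem.Str.split₀ query)
  let buckets := chores.foldl (fun (acc : List (List (String × String)) × List (List (String × String)) × List (List (String × String))) chore =>
      let title := PySem.Str.lower (pvTitle chore)
      if title = query then (acc.1 ++ [chore], acc.2.1, acc.2.2)
      else if PySem.Str.isIn query title then (acc.1, acc.2.1 ++ [chore], acc.2.2)
      else if PySem.Set.inter query_words (PySem.Set.ofList (PySem.Str.split₀ title)) ≠ [] then (acc.1, acc.2.1, acc.2.2 ++ [chore])
      else acc) ([], [], [])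
  if buckets.1 ≠ [] then buckets.1
  else if buckets.2.1 ≠ [] then buckets.2.1
  else buckets.2.2

-- ===== PRECONDITION & SPEC =====
-- Pre_ excludes exactly the inputs where Python A raises KeyError: a chore without a "title" key.
def Pre_fuzzy_match_all_chores_py (chores : List (List (String × String))) (title_query : String) : Prop :=
  ∀ chore ∈ chores, "title" ∈ chore.map Prod.fst

instance (chores : List (List (String × String))) (title_query : String) : Decidable (Pre_fuzzy_match_all_chores_py chores title_query) := by unfold Pre_fuzzy_match_all_chores_py; infer_instance

def pvWitness_fuzzy_match_all_chores_py : (List (List (String × String))) × String :=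
  ([[("title", "Wash Dishes")], [("title", "dusting")]], "wash dishes")

def Spec_fuzzy_match_all_chores_py (chores : List (List (String × String))) (title_query : String) (out : List (List (String × String))) : Prop := out = fuzzy_match_all_chores_py_alt chores title_query
instance (chores : List (List (String × String))) (title_query : String) (out : List (List (String × String))) : Decidable (Spec_fuzzy_match_all_chores_py chores title_query out) := by unfold Spec_fuzzy_match_all_chores_py; infer_instance

-- ===== CLAIM (what is proved, stated in full; the proofs are below) =====
def Claim_equal_fuzzy_match_all_chores_py : Prop := ∀ (chores : List (List (String × String))) (title_query : String), Dom_fuzzy_match_all_chores_py chores title_query → Pre_fuzzy_match_all_chores_py chores title_query → Spec_fuzzy_match_all_chores_py chores title_query (fuzzy_match_all_chores_py chores title_query)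

-- ===== LEMMAS AND PROOFS =====

-- B's bucketing loop computes the three filters (exclusive classification).
theorem pv_buckets_eq {α : Type} (p1 p2 p3 : α → Prop) [DecidablePred p1] [DecidablePred p2] [DecidablePred p3]
    (l : List α) (e c w : List α) :
    l.foldl (fun (acc : List α × List α × List α) x =>
        if p1 x then (acc.1 ++ [x], acc.2.1, acc.2.2)
        else if p2 x then (acc.1, acc.2.1 ++ [x], acc.2.2)
        else if p3 x then (acc.1, acc.2.1, acc.2.2 ++ [x])
        else acc) (e, c, w)
      = (e ++ l.filter (fun x => decide (p1 x)),
         c ++ l.filter (fun x => decide (¬ p1 x ∧ p2 x)),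
         w ++ l.filter (fun x => decide (¬ p1 x ∧ ¬ p2 x ∧ p3 x))) := by
  induction l generalizing e c w with
  | nil => simp
  | cons a t ih =>
    by_cases h1 : p1 a
    · simp [h1, ih]
    · by_cases h2 : p2 a
      · simp [h1, h2, ih]
      · by_cases h3 : p3 a
        · simp [h1, h2, h3, ih]
        · simp [h1, h2, h3, ih]

theorem pv_filter_and_left {α : Type} (p q : α → Prop) [DecidablePred p] [DecidablePred q]
    (l : List α) (h : l.filter (fun x => decide (p x)) = []) :
    l.filter (fun x => decide (¬ p x ∧ q x)) = l.filter (fun x => decide (q x)) := by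
  apply List.filter_congr
  intro x hx
  have hp : ¬ p x := by
    intro hpx
    have : x ∈ l.filter (fun x => decide (p x)) := List.mem_filter.mpr ⟨hx, by simpa⟩
    simp [h] at this
  simp [hp]

-- the exclusive tiers of B select the same result as A's short-circuiting cascade
theorem pv_tiers {α : Type} (p1 p2 p3 : α → Prop) [DecidablePred p1] [DecidablePred p2] [DecidablePred p3]
    (l : List α) :
    (if l.filter (fun x => decide (p1 x)) ≠ [] then l.filter (fun x => decide (p1 x))
     else if l.filter (fun x => decide (p2 x)) ≠ [] then l.filter (fun x => decide (p2 x))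
     else l.filter (fun x => decide (p3 x)))
    =
    (if l.filter (fun x => decide (p1 x)) ≠ [] then l.filter (fun x => decide (p1 x))
     else if l.filter (fun x => decide (¬ p1 x ∧ p2 x)) ≠ [] then l.filter (fun x => decide (¬ p1 x ∧ p2 x))
     else l.filter (fun x => decide (¬ p1 x ∧ ¬ p2 x ∧ p3 x))) := by
  by_cases h1 : l.filter (fun x => decide (p1 x)) = []
  · rw [pv_filter_and_left p1 p2 l h1, if_neg (not_not.mpr h1), if_neg (not_not.mpr h1)]
    by_cases h2 : l.filter (fun x => decide (p2 x)) = []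
    · have h3 : l.filter (fun x => decide (¬ p1 x ∧ ¬ p2 x ∧ p3 x)) = l.filter (fun x => decide (p3 x)) := by
        apply List.filter_congr
        intro x hx
        have hp1 : ¬ p1 x := by
          intro hpx
          have : x ∈ l.filter (fun x => decide (p1 x)) := List.mem_filter.mpr ⟨hx, by simpa⟩
          simp [h1] at this
        have hp2 : ¬ p2 x := by
          intro hpx
          have : x ∈ l.filter (fun x => decide (p2 x)) := List.mem_filter.mpr ⟨hx, by simpa⟩
          simp [h2] at this
        simp [hp1, hp2]
      rw [if_neg (not_not.mpr h2), if_neg (not_not.mpr h2), h3]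
    · rw [if_pos h2, if_pos h2]
  · rw [if_pos h1, if_pos h1]

-- ===== VERDICT (by name: the statement is the Claim_ definition above) =====
theorem fuzzy_match_all_chores_py_spec : Claim_equal_fuzzy_match_all_chores_py := by
  intro chores title_query _ _
  unfold Spec_fuzzy_match_all_chores_py fuzzy_match_all_chores_py fuzzy_match_all_chores_py_alt
  simp only [PySem.List.foldl_append_ite_eq_filter, pv_buckets_eq, List.nil_append]
  exact pv_tiers _ _ _ chores
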